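-- pv_equiv track=rewrite | github.com/azrael1865/Saraphis | independent_core/production_testing/component_validator.py | _count_validation_tests
-- ===== SOURCE A (Python) =====
-- from typing import Dict, List, Any, Optional
--
-- def _count_validation_tests(validation_results: Dict[str, Any]) -> Dict[str, Any]:
--     """Count validation tests by status"""
--     counts = {
--         'total': 0,
--         'passed': 0,
--         'failed': 0,
--         'skipped': 0
--     }
--
--     for result in validation_results.values():
--         tests = result.get('validation_tests', [])
--         counts['total'] += len(tests)
--
--         for test in tests:
--             status = test.get('status', 'unknown')
--             if status == 'passed':
--                 counts['passed'] += 1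
--             elif status == 'failed':
--                 counts['failed'] += 1
--             elif status == 'skipped':
--                 counts['skipped'] += 1
--
--     return counts
-- ===== SOURCE B (Python) =====
-- def _count_validation_tests(validation_results):
--     """Count validation tests by status"""
--     statuses = [test.get('status', 'unknown')
--                 for result in validation_results.values()
--                 for test in result.get('validation_tests', [])]
--     return {
--         'total': len(statuses),
--         'passed': statuses.count('passed'),
--         'failed': statuses.count('failed'),
--         'skipped': statuses.count('skipped'),
--     }
-- ===== Notes on version B (the rewrite author's own statement) =====
-- stated objective: idiomatic
-- what changed: Replaces the running four-counter dict with a branchy if/elif loop by one flattening pass collecting all statuses, then reads total as its length and each bucket as a list.count lookup.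
import Mathlib
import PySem

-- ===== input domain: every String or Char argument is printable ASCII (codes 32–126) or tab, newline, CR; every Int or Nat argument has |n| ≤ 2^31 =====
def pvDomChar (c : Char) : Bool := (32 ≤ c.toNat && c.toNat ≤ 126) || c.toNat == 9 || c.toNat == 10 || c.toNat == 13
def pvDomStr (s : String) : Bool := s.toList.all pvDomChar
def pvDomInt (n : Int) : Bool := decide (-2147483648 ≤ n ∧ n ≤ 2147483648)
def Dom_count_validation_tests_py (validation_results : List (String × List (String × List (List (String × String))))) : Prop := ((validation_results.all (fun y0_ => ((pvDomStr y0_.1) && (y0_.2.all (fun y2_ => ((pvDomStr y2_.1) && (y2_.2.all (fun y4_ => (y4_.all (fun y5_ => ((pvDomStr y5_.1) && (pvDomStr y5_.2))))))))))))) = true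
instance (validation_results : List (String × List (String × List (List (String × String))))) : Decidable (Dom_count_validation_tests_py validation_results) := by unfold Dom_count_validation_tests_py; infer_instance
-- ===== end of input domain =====

-- B replaces A's branchy running-counter loop with one flattening pass over the
-- statuses followed by length/count reads (idiomatic tabulate-then-extract).

-- ===== PORT A =====
def count_validation_tests_py (validation_results : List (String × List (String × List (List (String × String))))) : List (String × Int) :=
  let counts : PySem.Dict String Int :=
    PySem.Dict.mk [("total", 0), ("passed", 0), ("failed", 0), ("skipped", 0)]
  let counts := validation_results.foldl (fun counts kv =>
    let result : PySem.Dict String (List (List (String × String))) := PySem.Dict.mk kv.2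
    let tests := result.getD "validation_tests" []
    let counts := counts.insert "total" (counts.getD "total" 0 + (tests.length : Int))
    tests.foldl (fun counts test =>
      let status := (PySem.Dict.mk test).getD "status" "unknown"
      if status = "passed" then counts.insert "passed" (counts.getD "passed" 0 + 1)
      else if status = "failed" then counts.insert "failed" (counts.getD "failed" 0 + 1)
      else if status = "skipped" then counts.insert "skipped" (counts.getD "skipped" 0 + 1)
      else counts) counts) counts
  counts.items

-- ===== PORT B =====
def count_validation_tests_py_alt (validation_results : List (String × List (String × List (List (String × String))))) : List (String × Int) :=
  let statuses := validation_results.flatMap (fun kv =>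
    ((PySem.Dict.mk kv.2).getD "validation_tests" []).map
      (fun test => (PySem.Dict.mk test).getD "status" "unknown"))
  [("total", (statuses.length : Int)),
   ("passed", (statuses.count "passed" : Int)),
   ("failed", (statuses.count "failed" : Int)),
   ("skipped", (statuses.count "skipped" : Int))]

-- ===== PRECONDITION & SPEC =====
def Spec_count_validation_tests_py (validation_results : List (String × List (String × List (List (String × String))))) (out : List (String × Int)) : Prop := out = count_validation_tests_py_alt validation_results
instance (validation_results : List (String × List (String × List (List (String × String))))) (out : List (String × Int)) : Decidable (Spec_count_validation_tests_py validation_results out) := by unfold Spec_count_validation_tests_py; infer_instance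

-- ===== CLAIM (what is proved, stated in full; the proofs are below) =====
def Claim_equal_count_validation_tests_py : Prop := ∀ (validation_results : List (String × List (String × List (List (String × String))))), Dom_count_validation_tests_py validation_results → Spec_count_validation_tests_py validation_results (count_validation_tests_py validation_results)

-- ===== LEMMAS AND PROOFS =====

-- the four-counter dict A maintains, with symbolic values
def pvMk4 (t p f s : Int) : PySem.Dict String Int :=
  PySem.Dict.mk [("total", t), ("passed", p), ("failed", f), ("skipped", s)]

theorem pvMk4_inj {t p f s t' p' f' s' : Int} :
    pvMk4 t p f s = pvMk4 t' p' f' s' ↔ (t = t' ∧ p = p' ∧ f = f' ∧ s = s') := by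
  simp [pvMk4, PySem.Dict.mk.injEq]

theorem pvIns_total (t p f s v : Int) : (pvMk4 t p f s).insert "total" v = pvMk4 v p f s := rfl
theorem pvIns_passed (t p f s v : Int) : (pvMk4 t p f s).insert "passed" v = pvMk4 t v f s := rfl
theorem pvIns_failed (t p f s v : Int) : (pvMk4 t p f s).insert "failed" v = pvMk4 t p v s := rfl
theorem pvIns_skipped (t p f s v : Int) : (pvMk4 t p f s).insert "skipped" v = pvMk4 t p f v := rfl
theorem pvGet_total (t p f s : Int) : (pvMk4 t p f s).getD "total" 0 = t := rfl
theorem pvGet_passed (t p f s : Int) : (pvMk4 t p f s).getD "passed" 0 = p := rfl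
theorem pvGet_failed (t p f s : Int) : (pvMk4 t p f s).getD "failed" 0 = f := rfl
theorem pvGet_skipped (t p f s : Int) : (pvMk4 t p f s).getD "skipped" 0 = s := rfl

-- the inner test loop tallies counts of the mapped statuses
theorem pvInner (tests : List (List (String × String))) (t p f s : Int) :
    tests.foldl (fun counts test =>
      let status := (PySem.Dict.mk test).getD "status" "unknown"
      if status = "passed" then counts.insert "passed" (counts.getD "passed" 0 + 1)
      else if status = "failed" then counts.insert "failed" (counts.getD "failed" 0 + 1)
      else if status = "skipped" then counts.insert "skipped" (counts.getD "skipped" 0 + 1)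
      else counts) (pvMk4 t p f s)
    = pvMk4 t
        (p + ((tests.map (fun test => (PySem.Dict.mk test).getD "status" "unknown")).count "passed" : Int))
        (f + ((tests.map (fun test => (PySem.Dict.mk test).getD "status" "unknown")).count "failed" : Int))
        (s + ((tests.map (fun test => (PySem.Dict.mk test).getD "status" "unknown")).count "skipped" : Int)) := by
  induction tests generalizing p f s with
  | nil => simp
  | cons test rest ih =>
    simp only [List.foldl_cons, List.map_cons, List.count_cons]
    by_cases hp : (PySem.Dict.mk test).getD "status" "unknown" = "passed"
    · simp [hp, pvIns_passed, pvGet_passed, ih, pvMk4_inj]; ring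
    · by_cases hf : (PySem.Dict.mk test).getD "status" "unknown" = "failed"
      · simp [hf, pvIns_failed, pvGet_failed, ih, pvMk4_inj]; ring
      · by_cases hs : (PySem.Dict.mk test).getD "status" "unknown" = "skipped"
        · simp [hs, pvIns_skipped, pvGet_skipped, ih, pvMk4_inj]; ring
        · simp [hp, hf, hs, ih]

-- the outer loop, from an arbitrary counter state
theorem pvOuter (vr : List (String × List (String × List (List (String × String))))) (t p f s : Int) :
    vr.foldl (fun counts kv =>
      let result : PySem.Dict String (List (List (String × String))) := PySem.Dict.mk kv.2
      let tests := result.getD "validation_tests" []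
      let counts := counts.insert "total" (counts.getD "total" 0 + (tests.length : Int))
      tests.foldl (fun counts test =>
        let status := (PySem.Dict.mk test).getD "status" "unknown"
        if status = "passed" then counts.insert "passed" (counts.getD "passed" 0 + 1)
        else if status = "failed" then counts.insert "failed" (counts.getD "failed" 0 + 1)
        else if status = "skipped" then counts.insert "skipped" (counts.getD "skipped" 0 + 1)
        else counts) counts) (pvMk4 t p f s)
    = pvMk4 (t + ((vr.flatMap (fun kv => ((PySem.Dict.mk kv.2).getD "validation_tests" []).map (fun test => (PySem.Dict.mk test).getD "status" "unknown"))).length : Int))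
        (p + ((vr.flatMap (fun kv => ((PySem.Dict.mk kv.2).getD "validation_tests" []).map (fun test => (PySem.Dict.mk test).getD "status" "unknown"))).count "passed" : Int))
        (f + ((vr.flatMap (fun kv => ((PySem.Dict.mk kv.2).getD "validation_tests" []).map (fun test => (PySem.Dict.mk test).getD "status" "unknown"))).count "failed" : Int))
        (s + ((vr.flatMap (fun kv => ((PySem.Dict.mk kv.2).getD "validation_tests" []).map (fun test => (PySem.Dict.mk test).getD "status" "unknown"))).count "skipped" : Int)) := by
  induction vr generalizing t p f s with
  | nil => simp
  | cons kv rest ih =>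
    simp only [List.foldl_cons, List.flatMap_cons, List.count_append, List.length_append]
    rw [pvGet_total, pvIns_total, pvInner, ih]
    simp [pvMk4_inj, List.length_map]
    refine ⟨by ring, by ring, by ring, by ring⟩

-- ===== VERDICT (by name: the statement is the Claim_ definition above) =====
theorem count_validation_tests_py_spec : Claim_equal_count_validation_tests_py := by
  intro vr _
  unfold Spec_count_validation_tests_py count_validation_tests_py count_validation_tests_py_alt
  show (List.foldl _ (pvMk4 0 0 0 0) vr).items = _
  rw [pvOuter]
  simp [pvMk4]
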